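-- pv_equiv track=rewrite | github.com/anuragprat1k/discovery | iterative_countdown/environment/problem_generator.py | _build_left_to_right_expr
-- ===== SOURCE A (Python) =====
-- def _build_left_to_right_expr(nums: list[int], ops: list[str]) -> str:
--     """Build a left-to-right expression string (with parentheses for clarity)."""
--     if len(nums) == 1:
--         return str(nums[0])
--     expr = str(nums[0])
--     for i, op in enumerate(ops):
--         if i > 0:
--             expr = f"({expr})"
--         expr = f"{expr} {op} {nums[i + 1]}"
--     return expr
-- ===== SOURCE B (Python) =====
-- def _build_left_to_right_expr(nums: list[int], ops: list[str]) -> str: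
--     """Build a left-to-right expression string (with parentheses for clarity)."""
--     if len(nums) == 1:
--         return str(nums[0])
--     if len(ops) == 0:
--         return str(nums[0])
--     parts = ['(' * (len(ops) - 1), f"{nums[0]} {ops[0]} {nums[1]}"]
--     for i in range(1, len(ops)):
--         parts.append(f") {ops[i]} {nums[i + 1]}")
--     return ''.join(parts)
-- ===== Notes on version B (the rewrite author's own statement) =====
-- stated objective: alternative
-- what changed: Instead of repeatedly re-wrapping a growing accumulator string in parentheses, B emits the structurally fixed pieces once - a prefix of len(ops)-1 opening parentheses, the first 'a op b' body, and one ') op num' suffix per remaining operator - and joins them, avoiding quadratic re-copying of the accumulator.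
import Mathlib
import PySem

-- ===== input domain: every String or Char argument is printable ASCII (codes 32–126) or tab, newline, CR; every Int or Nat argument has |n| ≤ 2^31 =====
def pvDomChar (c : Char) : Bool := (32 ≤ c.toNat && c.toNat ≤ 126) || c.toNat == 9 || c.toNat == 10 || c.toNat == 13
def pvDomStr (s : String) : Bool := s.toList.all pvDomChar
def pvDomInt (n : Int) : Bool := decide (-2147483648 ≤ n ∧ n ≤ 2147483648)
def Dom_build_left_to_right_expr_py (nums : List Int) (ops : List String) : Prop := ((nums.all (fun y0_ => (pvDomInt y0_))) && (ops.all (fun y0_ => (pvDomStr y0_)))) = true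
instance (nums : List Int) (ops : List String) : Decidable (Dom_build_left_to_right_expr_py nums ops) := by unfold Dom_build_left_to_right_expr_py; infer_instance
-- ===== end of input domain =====

-- B builds the expression from fixed pieces (paren prefix + body + one suffix per extra op) joined once,
-- instead of A's repeated re-wrapping of an accumulator string; return values proved equal on Pre_.


-- str(nums[j]) as a character list; the .getD 0 default is never reached under Pre_ (Python raises there)
def pvNum (nums : List Int) (j : Int) : List Char :=
  PySem.Int.toChars ((PySem.List.pyGet? nums j).getD 0)

-- ===== PORT A =====
-- loop body of A: 'if i > 0: expr = f"({expr})"' then 'expr = f"{expr} {op} {nums[i+1]}"'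
def pvStepA (nums : List Int) (expr : List Char) (iop : Int × String) : List Char :=
  (if iop.1 > 0 then '(' :: (expr ++ [')']) else expr)
    ++ ' ' :: iop.2.toList ++ ' ' :: pvNum nums (iop.1 + 1)

def build_left_to_right_expr_py (nums : List Int) (ops : List String) : String :=
  if nums.length = 1 then String.ofList (pvNum nums 0)
  else
    String.ofList ((PySem.List.enumerate ops).foldl (pvStepA nums) (pvNum nums 0))

-- ===== PORT B =====
-- one piece f") {ops[i]} {nums[i+1]}" of B's parts list
def pvPieceB (nums : List Int) (ops : List String) (i : Int) : List Char :=
  ')' :: ' ' :: ((PySem.List.pyGet? ops i).getD "").toList ++ ' ' :: pvNum nums (i + 1)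

def build_left_to_right_expr_py_alt (nums : List Int) (ops : List String) : String :=
  if nums.length = 1 then String.ofList (pvNum nums 0)
  else if ops.length = 0 then String.ofList (pvNum nums 0)
  else
    let parts : List (List Char) :=
      List.replicate (ops.length - 1) '('
        :: (pvNum nums 0 ++ ' ' :: ((PySem.List.pyGet? ops 0).getD "").toList ++ ' ' :: pvNum nums 1)
        :: (PySem.List.pyRange 1 (ops.length : Int)).map (pvPieceB nums ops)
    String.ofList (PySem.Chars.join [] parts)

-- ===== PRECONDITION & SPEC =====
-- Pre_ excludes exactly the inputs where the Python A raises IndexError: empty nums,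
-- and ops too long for nums (unless len(nums) == 1, where A returns before the loop).
def Pre_build_left_to_right_expr_py (nums : List Int) (ops : List String) : Prop :=
  nums ≠ [] ∧ (nums.length = 1 ∨ ops.length < nums.length)
instance (nums : List Int) (ops : List String) : Decidable (Pre_build_left_to_right_expr_py nums ops) := by unfold Pre_build_left_to_right_expr_py; infer_instance

def pvWitness_build_left_to_right_expr_py : List Int × List String := ([1, 2, 3], ["+", "-"])

def Spec_build_left_to_right_expr_py (nums : List Int) (ops : List String) (out : String) : Prop := out = build_left_to_right_expr_py_alt nums ops
instance (nums : List Int) (ops : List String) (out : String) : Decidable (Spec_build_left_to_right_expr_py nums ops out) := by unfold Spec_build_left_to_right_expr_py; infer_instance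

-- ===== CLAIM (what is proved, stated in full; the proofs are below) =====
def Claim_equal_build_left_to_right_expr_py : Prop := ∀ (nums : List Int) (ops : List String), Dom_build_left_to_right_expr_py nums ops → Pre_build_left_to_right_expr_py nums ops → Spec_build_left_to_right_expr_py nums ops (build_left_to_right_expr_py nums ops)

-- ===== LEMMAS AND PROOFS =====

-- ''.join is concatenation
lemma join_empty_sep (l : List (List Char)) : PySem.Chars.join [] l = l.flatten := by
  simp [PySem.Chars.join, List.intercalate]
  induction l with
  | nil => simp
  | cons a t ih => cases t <;> simp_all [List.intersperse]

-- pyGet? on an in-range Nat index ignores an appended tail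
lemma pyGet?_append_left {α : Type} (xs ys : List α) (i : Int) (h0 : 0 ≤ i) (h : i < xs.length) :
    PySem.List.pyGet? (xs ++ ys) i = PySem.List.pyGet? xs i := by
  obtain ⟨n, rfl⟩ := Int.eq_ofNat_of_zero_le h0
  rw [PySem.List.pyGet?_natCast, PySem.List.pyGet?_natCast,
    List.getElem?_append_left (by exact_mod_cast h)]

-- the pieces of B's loop do not look past index ops.length, so appending an op leaves them unchanged
lemma pvPieceB_append (nums : List Int) (xs : List String) (x : String) (i : Int)
    (h0 : 0 ≤ i) (h : i < xs.length) :
    pvPieceB nums (xs ++ [x]) i = pvPieceB nums xs i := by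
  unfold pvPieceB
  rw [pyGet?_append_left _ _ _ h0 h]

-- A's accumulator after the whole loop IS B's pieces, concatenated (the heart of the equivalence)
lemma foldA_eq (nums : List Int) (ops : List String) (h : ops ≠ []) :
    (PySem.List.enumerate ops).foldl (pvStepA nums) (pvNum nums 0)
      = List.replicate (ops.length - 1) '('
          ++ ((pvNum nums 0 ++ ' ' :: ((PySem.List.pyGet? ops 0).getD "").toList ++ ' ' :: pvNum nums 1)
          :: (PySem.List.pyRange 1 (ops.length : Int)).map (pvPieceB nums ops)).flatten := by
  induction ops using List.reverseRecOn with
  | nil => exact absurd rfl h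
  | append_singleton xs x ih =>
    by_cases hxs : xs = []
    · subst hxs
      simp [PySem.List.enumerate, pvStepA, PySem.List.pyRange, PySem.List.pyGet?, PySem.List.pyIdx?]
    · have hlen : 1 ≤ xs.length := List.length_pos_iff.mpr hxs
      rw [PySem.List.enumerate_append, List.foldl_append, ih hxs]
      have hget0 : PySem.List.pyGet? (xs ++ [x]) 0 = PySem.List.pyGet? xs 0 :=
        pyGet?_append_left _ _ _ le_rfl (by exact_mod_cast hlen)
      have hmap : (PySem.List.pyRange 1 (xs.length : Int)).map (pvPieceB nums (xs ++ [x]))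
          = (PySem.List.pyRange 1 (xs.length : Int)).map (pvPieceB nums xs) := by
        apply List.map_congr_left
        intro i hi
        rw [PySem.List.mem_pyRange_one] at hi
        exact pvPieceB_append nums xs x i (by omega) (by omega)
      have hrange : PySem.List.pyRange 1 ((xs.length : Int) + 1)
          = PySem.List.pyRange 1 (xs.length : Int) ++ [(xs.length : Int)] :=
        PySem.List.pyRange_one_succ_right (by exact_mod_cast hlen)
      have hlast : pvPieceB nums (xs ++ [x]) (xs.length : Int)
          = ')' :: ' ' :: x.toList ++ ' ' :: pvNum nums ((xs.length : Int) + 1) := by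
        unfold pvPieceB
        rw [PySem.List.pyGet?_natCast]
        simp
      have hrep : List.replicate xs.length '(' = '(' :: List.replicate (xs.length - 1) '(' := by
        have he : xs.length = (xs.length - 1) + 1 := by omega
        rw [he, List.replicate_succ]
        simp
      simp only [PySem.List.enumerate_cons, PySem.List.enumerate_nil, List.foldl_cons,
        List.foldl_nil, List.length_append, List.length_cons, List.length_nil, zero_add]
      unfold pvStepA
      rw [if_pos (by exact_mod_cast hlen : (0:Int) < (xs.length:Int))]
      push_cast
      rw [hrep, hrange, List.map_append, hmap, hget0]
      simp [hlast, List.append_assoc]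

-- ===== VERDICT (by name: the statement is the Claim_ definition above) =====
theorem build_left_to_right_expr_py_spec : Claim_equal_build_left_to_right_expr_py := by
  intro nums ops _ _
  unfold Spec_build_left_to_right_expr_py build_left_to_right_expr_py build_left_to_right_expr_py_alt
  by_cases h1 : nums.length = 1
  · simp [h1]
  · rw [if_neg h1, if_neg h1]
    by_cases h0 : ops.length = 0
    · rw [if_pos h0, List.eq_nil_of_length_eq_zero h0]
      simp [PySem.List.enumerate]
    · rw [if_neg h0]
      have h : ops ≠ [] := fun he => h0 (by simp [he])
      rw [foldA_eq nums ops h]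
      simp [join_empty_sep]
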